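-- pv_equiv track=rewrite | github.com/MaxPhilb/epicArduino | chenillard/main.py | createBoolString
-- ===== SOURCE A (Python) =====
-- def createBoolString(id,state):
--     str="";
--     for i in range(32):
--         if state:
--             if i==id:
--                 str+="1,";
--             else:
--                 str+="0,";
--         else:
--             str+="0,";
--     str=str[0:len(str)-1];
--     return str
-- ===== SOURCE B (Python) =====
-- def createBoolString(id, state):
--     row = ["0"] * 32
--     if state and 0 <= id < 32:
--         row[id] = "1"
--     return ",".join(row)
-- ===== Notes on version B (the rewrite author's own statement) =====
-- stated objective: simpler
-- what changed: Replaces the 32-step accumulate-and-compare loop (plus trailing-comma slice) with direct index placement of '1' into a prefilled list of '0' strings and a single join.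
import Mathlib
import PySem

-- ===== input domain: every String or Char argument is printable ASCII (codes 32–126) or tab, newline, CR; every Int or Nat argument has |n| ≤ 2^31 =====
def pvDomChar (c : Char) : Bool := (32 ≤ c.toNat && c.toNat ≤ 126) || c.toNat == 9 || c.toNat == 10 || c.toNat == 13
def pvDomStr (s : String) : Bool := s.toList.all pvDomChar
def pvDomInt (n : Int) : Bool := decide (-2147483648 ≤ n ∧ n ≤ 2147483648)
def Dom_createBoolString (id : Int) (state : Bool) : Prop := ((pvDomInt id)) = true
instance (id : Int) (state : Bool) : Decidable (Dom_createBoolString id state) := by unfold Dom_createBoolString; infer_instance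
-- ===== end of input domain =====

-- ===== PORT A =====
-- B builds the 32-entry row directly and joins once, instead of A's accumulate-and-compare loop (objective: simpler).
def createBoolString (id : Int) (state : Bool) : String :=
  let s := (PySem.List.pyRange 0 32 1).foldl
    (fun str i =>
      if state then
        (if i == id then str ++ "1," else str ++ "0,")
      else str ++ "0,") ""
  PySem.Str.slice s (some 0) (some (PySem.Str.len s - 1))

-- ===== PORT B =====
def createBoolString_alt (id : Int) (state : Bool) : String :=
  let row := List.replicate 32 "0"
  let row := if state && decide (0 ≤ id) && decide (id < 32) then row.set id.toNat "1" else row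
  PySem.Str.join "," row

-- ===== PRECONDITION & SPEC =====
def Spec_createBoolString (id : Int) (state : Bool) (out : String) : Prop := out = createBoolString_alt id state
instance (id : Int) (state : Bool) (out : String) : Decidable (Spec_createBoolString id state out) := by unfold Spec_createBoolString; infer_instance

-- ===== CLAIM (what is proved, stated in full; the proofs are below) =====
def Claim_equal_createBoolString : Prop := ∀ (id : Int) (state : Bool), Dom_createBoolString id state → Spec_createBoolString id state (createBoolString id state)

-- ===== LEMMAS AND PROOFS =====

theorem pvKey0_createBoolString : createBoolString (0 : Int) true = createBoolString_alt (0 : Int) true := by decide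
theorem pvKey1_createBoolString : createBoolString (1 : Int) true = createBoolString_alt (1 : Int) true := by decide
theorem pvKey2_createBoolString : createBoolString (2 : Int) true = createBoolString_alt (2 : Int) true := by decide
theorem pvKey3_createBoolString : createBoolString (3 : Int) true = createBoolString_alt (3 : Int) true := by decide
theorem pvKey4_createBoolString : createBoolString (4 : Int) true = createBoolString_alt (4 : Int) true := by decide
theorem pvKey5_createBoolString : createBoolString (5 : Int) true = createBoolString_alt (5 : Int) true := by decide
theorem pvKey6_createBoolString : createBoolString (6 : Int) true = createBoolString_alt (6 : Int) true := by decide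
theorem pvKey7_createBoolString : createBoolString (7 : Int) true = createBoolString_alt (7 : Int) true := by decide
theorem pvKey8_createBoolString : createBoolString (8 : Int) true = createBoolString_alt (8 : Int) true := by decide
theorem pvKey9_createBoolString : createBoolString (9 : Int) true = createBoolString_alt (9 : Int) true := by decide
theorem pvKey10_createBoolString : createBoolString (10 : Int) true = createBoolString_alt (10 : Int) true := by decide
theorem pvKey11_createBoolString : createBoolString (11 : Int) true = createBoolString_alt (11 : Int) true := by decide
theorem pvKey12_createBoolString : createBoolString (12 : Int) true = createBoolString_alt (12 : Int) true := by decide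
theorem pvKey13_createBoolString : createBoolString (13 : Int) true = createBoolString_alt (13 : Int) true := by decide
theorem pvKey14_createBoolString : createBoolString (14 : Int) true = createBoolString_alt (14 : Int) true := by decide
theorem pvKey15_createBoolString : createBoolString (15 : Int) true = createBoolString_alt (15 : Int) true := by decide
theorem pvKey16_createBoolString : createBoolString (16 : Int) true = createBoolString_alt (16 : Int) true := by decide
theorem pvKey17_createBoolString : createBoolString (17 : Int) true = createBoolString_alt (17 : Int) true := by decide
theorem pvKey18_createBoolString : createBoolString (18 : Int) true = createBoolString_alt (18 : Int) true := by decide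
theorem pvKey19_createBoolString : createBoolString (19 : Int) true = createBoolString_alt (19 : Int) true := by decide
theorem pvKey20_createBoolString : createBoolString (20 : Int) true = createBoolString_alt (20 : Int) true := by decide
theorem pvKey21_createBoolString : createBoolString (21 : Int) true = createBoolString_alt (21 : Int) true := by decide
theorem pvKey22_createBoolString : createBoolString (22 : Int) true = createBoolString_alt (22 : Int) true := by decide
theorem pvKey23_createBoolString : createBoolString (23 : Int) true = createBoolString_alt (23 : Int) true := by decide
theorem pvKey24_createBoolString : createBoolString (24 : Int) true = createBoolString_alt (24 : Int) true := by decide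
theorem pvKey25_createBoolString : createBoolString (25 : Int) true = createBoolString_alt (25 : Int) true := by decide
theorem pvKey26_createBoolString : createBoolString (26 : Int) true = createBoolString_alt (26 : Int) true := by decide
theorem pvKey27_createBoolString : createBoolString (27 : Int) true = createBoolString_alt (27 : Int) true := by decide
theorem pvKey28_createBoolString : createBoolString (28 : Int) true = createBoolString_alt (28 : Int) true := by decide
theorem pvKey29_createBoolString : createBoolString (29 : Int) true = createBoolString_alt (29 : Int) true := by decide
theorem pvKey30_createBoolString : createBoolString (30 : Int) true = createBoolString_alt (30 : Int) true := by decide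
theorem pvKey31_createBoolString : createBoolString (31 : Int) true = createBoolString_alt (31 : Int) true := by decide

theorem pvFalse_createBoolString (id : Int) : createBoolString id false = createBoolString_alt id false := by
  simp only [createBoolString, createBoolString_alt, Bool.false_and, if_false, Bool.false_eq_true]
  decide

theorem pvOut_createBoolString (id : Int) (h1 : id < 0 ∨ 32 ≤ id) :
    createBoolString id true = createBoolString_alt id true := by
  have hc : (true && decide (0 ≤ id) && decide (id < 32)) = false := by
    simp only [Bool.true_and, Bool.and_eq_false_iff, decide_eq_false_iff_not]
    omega
  have hfold : (PySem.List.pyRange 0 32 1).foldl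
      (fun (str : String) i => if i = id then str ++ "1," else str ++ "0,") ""
      = (PySem.List.pyRange 0 32 1).foldl (fun (str : String) (_ : Int) => str ++ "0,") "" := by
    apply PySem.List.foldl_congr_mem
    intro acc x hx
    rw [PySem.List.mem_pyRange_one] at hx
    rw [if_neg (by omega)]
  simp only [createBoolString, createBoolString_alt, hc, Bool.false_eq_true,
    if_false, if_true, beq_iff_eq]
  rw [hfold]
  decide

theorem pvIn_createBoolString (id : Int) (h1 : 0 ≤ id) (h2 : id < 32) :
    createBoolString id true = createBoolString_alt id true := by
  have hcases : id = 0 ∨ id = 1 ∨ id = 2 ∨ id = 3 ∨ id = 4 ∨ id = 5 ∨ id = 6 ∨ id = 7 ∨ id = 8 ∨ id = 9 ∨ id = 10 ∨ id = 11 ∨ id = 12 ∨ id = 13 ∨ id = 14 ∨ id = 15 ∨ id = 16 ∨ id = 17 ∨ id = 18 ∨ id = 19 ∨ id = 20 ∨ id = 21 ∨ id = 22 ∨ id = 23 ∨ id = 24 ∨ id = 25 ∨ id = 26 ∨ id = 27 ∨ id = 28 ∨ id = 29 ∨ id = 30 ∨ id = 31 := by omega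
  rcases hcases with rfl|rfl|rfl|rfl|rfl|rfl|rfl|rfl|rfl|rfl|rfl|rfl|rfl|rfl|rfl|rfl|rfl|rfl|rfl|rfl|rfl|rfl|rfl|rfl|rfl|rfl|rfl|rfl|rfl|rfl|rfl|rfl
  exacts [pvKey0_createBoolString, pvKey1_createBoolString, pvKey2_createBoolString, pvKey3_createBoolString, pvKey4_createBoolString, pvKey5_createBoolString, pvKey6_createBoolString, pvKey7_createBoolString, pvKey8_createBoolString, pvKey9_createBoolString, pvKey10_createBoolString, pvKey11_createBoolString, pvKey12_createBoolString, pvKey13_createBoolString, pvKey14_createBoolString, pvKey15_createBoolString, pvKey16_createBoolString, pvKey17_createBoolString, pvKey18_createBoolString, pvKey19_createBoolString, pvKey20_createBoolString, pvKey21_createBoolString, pvKey22_createBoolString, pvKey23_createBoolString, pvKey24_createBoolString, pvKey25_createBoolString, pvKey26_createBoolString, pvKey27_createBoolString, pvKey28_createBoolString, pvKey29_createBoolString, pvKey30_createBoolString, pvKey31_createBoolString]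

-- ===== VERDICT (by name: the statement is the Claim_ definition above) =====
theorem createBoolString_spec : Claim_equal_createBoolString := by
  intro id state _
  unfold Spec_createBoolString
  cases state with
  | false => exact pvFalse_createBoolString id
  | true =>
      by_cases h : 0 ≤ id ∧ id < 32
      · exact pvIn_createBoolString id h.1 h.2
      · exact pvOut_createBoolString id (by omega)
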